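-- pv_equiv track=rewrite | github.com/voaitmann1/python1 | AP/MyMathLib.py | fGorner_forRoot_coefsOrderPowerDecrease
-- ===== SOURCE A (Python) =====
-- def fGorner_forGeneral_coefsOrderPowerDecrease(ap, cr):
--     ord1=len(ap)
--     ord2=ord1-1
--     bp=[]
--     bp.append(ap[1-1])
--     for k in range(2, ord1+1):
--         bp.append(ap[k-1]+cr*bp[k-1-1])
--     return bp
--
-- def fGorner_forRoot_coefsOrderPowerDecrease(ap, cp):
--     ord1=len(ap)
--     ord2=ord1-1
--     fp=[]
--     bp=fGorner_forGeneral_coefsOrderPowerDecrease(ap, cp)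
--     for k in range(1, ord2+1):
--         fp.append(bp[k-1])
--     return fp
-- ===== SOURCE B (Python) =====
-- def fGorner_forRoot_coefsOrderPowerDecrease(ap, cp):
--     # Closed form: the k-th quotient coefficient of dividing by (x - cp) is
--     # sum_{j<=k} ap[j] * cp**(k-j); compute each output independently as a
--     # convolution of ap with a precomputed table of powers of cp.
--     n = len(ap)
--     pw = [cp ** i for i in range(max(n - 1, 0))]
--     return [sum(ap[j] * pw[k - j] for j in range(k + 1)) for k in range(n - 1)]
-- ===== Notes on version B (the rewrite author's own statement) =====
-- stated objective: alternative
-- what changed: Replaces the synthetic-division recurrence (helper building the full coefficient list plus a copy loop) by the closed-form formula: each quotient coefficient is computed independently as sum_{j<=k} ap[j]*cp**(k-j), a convolution of ap with a precomputed power table, with no recurrence and no intermediate coefficient list; it trades speed for this independence (quadratic instead of linear, so slower on large inputs).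
import Mathlib
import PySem

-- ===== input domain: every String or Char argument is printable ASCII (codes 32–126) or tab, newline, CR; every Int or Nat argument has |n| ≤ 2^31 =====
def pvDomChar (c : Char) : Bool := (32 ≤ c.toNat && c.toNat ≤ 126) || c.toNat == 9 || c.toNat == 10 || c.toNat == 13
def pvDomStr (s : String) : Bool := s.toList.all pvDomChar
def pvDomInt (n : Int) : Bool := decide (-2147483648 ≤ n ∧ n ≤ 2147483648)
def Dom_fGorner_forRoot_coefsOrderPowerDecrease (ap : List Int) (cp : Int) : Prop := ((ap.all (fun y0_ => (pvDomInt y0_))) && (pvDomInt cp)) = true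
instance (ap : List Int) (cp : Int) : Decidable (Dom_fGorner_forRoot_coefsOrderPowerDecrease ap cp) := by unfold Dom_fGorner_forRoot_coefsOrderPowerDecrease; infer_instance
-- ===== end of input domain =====

-- B replaces A's synthetic-division recurrence by the closed-form per-coefficient sum
-- sum_{j<=k} ap[j]*cp^(k-j) (objective: alternative). Equivalence of return values on non-empty ap.

-- ===== PORT A =====
def fGorner_forGeneral_coefsOrderPowerDecrease (ap : List Int) (cr : Int) : List Int :=
  let ord1 : Int := PySem.List.len ap
  let bp : List Int := [] ++ [PySem.List.pyGetD ap (1-1) 0]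
  (PySem.List.pyRange 2 (ord1+1) 1).foldl
    (fun bp k => bp ++ [PySem.List.pyGetD ap (k-1) 0 + cr * PySem.List.pyGetD bp (k-1-1) 0]) bp

def fGorner_forRoot_coefsOrderPowerDecrease (ap : List Int) (cp : Int) : List Int :=
  let ord1 : Int := PySem.List.len ap
  let ord2 : Int := ord1 - 1
  let bp : List Int := fGorner_forGeneral_coefsOrderPowerDecrease ap cp
  (PySem.List.pyRange 1 (ord2+1) 1).foldl (fun fp k => fp ++ [PySem.List.pyGetD bp (k-1) 0]) []

-- ===== PORT B =====
-- every index j is in range (j ≤ k < len ap - 1), so getD's default is never used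
def fGorner_forRoot_coefsOrderPowerDecrease_alt (ap : List Int) (cp : Int) : List Int :=
  let pw : List Int := (List.range (ap.length - 1)).map (fun i => cp ^ i)
  (List.range (ap.length - 1)).map (fun k =>
    ((List.range (k + 1)).map (fun j => ap.getD j 0 * pw.getD (k - j) 0)).sum)

-- ===== PRECONDITION & SPEC =====
-- Pre_ excludes only the empty list, on which A raises IndexError at ap[0].
def Pre_fGorner_forRoot_coefsOrderPowerDecrease (ap : List Int) (cp : Int) : Prop := ap ≠ []
instance (ap : List Int) (cp : Int) : Decidable (Pre_fGorner_forRoot_coefsOrderPowerDecrease ap cp) := by unfold Pre_fGorner_forRoot_coefsOrderPowerDecrease; infer_instance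
def pvWitness_fGorner_forRoot_coefsOrderPowerDecrease : List Int × Int := ([1, 2, 3], 2)

def Spec_fGorner_forRoot_coefsOrderPowerDecrease (ap : List Int) (cp : Int) (out : List Int) : Prop := out = fGorner_forRoot_coefsOrderPowerDecrease_alt ap cp
instance (ap : List Int) (cp : Int) (out : List Int) : Decidable (Spec_fGorner_forRoot_coefsOrderPowerDecrease ap cp out) := by unfold Spec_fGorner_forRoot_coefsOrderPowerDecrease; infer_instance

-- ===== CLAIM (what is proved, stated in full; the proofs are below) =====
def Claim_equal_fGorner_forRoot_coefsOrderPowerDecrease : Prop := ∀ (ap : List Int) (cp : Int), Dom_fGorner_forRoot_coefsOrderPowerDecrease ap cp → Pre_fGorner_forRoot_coefsOrderPowerDecrease ap cp → Spec_fGorner_forRoot_coefsOrderPowerDecrease ap cp (fGorner_forRoot_coefsOrderPowerDecrease ap cp)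

-- ===== LEMMAS AND PROOFS =====

-- Reference: the full synthetic-division (Horner) coefficient list from seed `prev` over tail `l`.
def goH (cp prev : Int) : List Int → List Int
  | [] => [prev]
  | x :: xs => prev :: goH cp (x + cp * prev) xs

-- and its last element (the remainder seed).
def lastH (cp prev : Int) : List Int → Int
  | [] => prev
  | x :: xs => lastH cp (x + cp * prev) xs

theorem length_goH (cp prev : Int) (l : List Int) : (goH cp prev l).length = l.length + 1 := by
  induction l generalizing prev with
  | nil => simp [goH]
  | cons x xs ih => simp [goH, ih]

theorem getD_goH_last (cp prev : Int) (l : List Int) :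
    (goH cp prev l).getD l.length 0 = lastH cp prev l := by
  induction l generalizing prev with
  | nil => simp [goH, lastH]
  | cons x xs ih => simpa [goH, lastH, List.getD] using ih (x + cp * prev)

theorem goH_append (cp prev : Int) (l : List Int) (x : Int) :
    goH cp prev (l ++ [x]) = goH cp prev l ++ [x + cp * lastH cp prev l] := by
  induction l generalizing prev with
  | nil => simp [goH, lastH]
  | cons y ys ih => simp [goH, lastH, ih]

-- A's bp loop, reindexed over List.range, builds goH over the processed prefix of the tail.
theorem bp_inv (cp a0 : Int) (l : List Int) :
    ∀ m : Nat, m ≤ l.length →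
    (List.range m).foldl (fun acc k => acc ++ [l.getD k 0 + cp * acc.getD k 0]) [a0]
      = goH cp a0 (l.take m) := by
  intro m hm
  induction m with
  | zero => simp [goH]
  | succ m ih =>
    have hm' : m ≤ l.length := by omega
    have hlt : m < l.length := by omega
    rw [List.range_succ, List.foldl_append, ih hm']
    have hlen : (goH cp a0 (l.take m)).getD m 0 = lastH cp a0 (l.take m) := by
      have := getD_goH_last cp a0 (l.take m)
      rwa [List.length_take, Nat.min_eq_left hm'] at this
    have htake : l.take (m + 1) = l.take m ++ [l[m]] := by
      rw [List.take_add_one]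
      simp [List.getElem?_eq_getElem hlt]
    simp only [List.foldl_cons, List.foldl_nil, hlen, htake, goH_append,
      List.getD_eq_getElem l 0 hlt]

-- (List.range m).map (·-th element with default) is the m-prefix.
theorem map_getD_range_take {xs : List Int} (m : Nat) (hm : m ≤ xs.length) :
    (List.range m).map (fun k => xs.getD k 0) = xs.take m := by
  induction m with
  | zero => simp
  | succ m ih =>
    have hlt : m < xs.length := by omega
    rw [List.range_succ, List.map_append, ih (by omega), List.take_add_one]
    simp [List.getElem?_eq_getElem hlt]

-- A's result: the (n-1)-prefix of goH over the tail.
theorem fA_eq (ap : List Int) (cp : Int) (h : ap ≠ []) :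
    fGorner_forRoot_coefsOrderPowerDecrease ap cp
      = (goH cp (ap.getD 0 0) ap.tail).dropLast := by
  obtain ⟨a0, l, rfl⟩ : ∃ a0 l, ap = a0 :: l := by
    cases ap with
    | nil => exact absurd rfl h
    | cons a0 l => exact ⟨a0, l, rfl⟩
  unfold fGorner_forRoot_coefsOrderPowerDecrease fGorner_forGeneral_coefsOrderPowerDecrease
  simp only [PySem.List.len_eq, PySem.List.pyRange_one, List.foldl_map, List.length_cons]
  have e1 : (((l.length + 1 : Nat) : Int) + 1 - 2).toNat = l.length := by push_cast; omega
  have e2 : (((l.length + 1 : Nat) : Int) - 1 + 1 - 1).toNat = l.length := by push_cast; omega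
  rw [e1]
  have hbody : (fun (acc : List Int) (k : Nat) =>
      acc ++ [PySem.List.pyGetD (a0 :: l) (2 + (k:Int) - 1) 0
        + cp * PySem.List.pyGetD acc (2 + (k:Int) - 1 - 1) 0])
      = (fun acc k => acc ++ [l.getD k 0 + cp * acc.getD k 0]) := by
    funext acc k
    have h1 : (2 + (k:Int) - 1) = ((k+1 : Nat) : Int) := by push_cast; ring
    have h2 : (2 + (k:Int) - 1 - 1) = ((k : Nat) : Int) := by push_cast; ring
    rw [h2, h1, PySem.List.pyGetD_natCast, PySem.List.pyGetD_natCast]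
    simp
  rw [hbody, show PySem.List.pyGetD (a0 :: l) (1-1) 0 = a0 by simp [PySem.List.pyGetD_zero_cons]]
  simp only [List.nil_append]
  rw [bp_inv cp a0 l l.length le_rfl, List.take_length]
  -- the copy loop
  have hbody2 : (fun (acc : List Int) (k : Nat) =>
      acc ++ [PySem.List.pyGetD (goH cp a0 l) (1 + (k:Int) - 1) 0])
      = (fun acc k => acc ++ [(goH cp a0 l).getD k 0]) := by
    funext acc k
    have h1 : (1 + (k:Int) - 1) = ((k : Nat) : Int) := by push_cast; ring
    rw [h1, PySem.List.pyGetD_natCast]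
  rw [e2, hbody2,
    PySem.List.foldl_append_singleton_eq_map, List.nil_append,
    map_getD_range_take l.length (by rw [length_goH]; omega),
    List.dropLast_eq_take, length_goH]
  simp

-- The closed-form coefficient: S ap cp k = sum_{j<=k} ap[j] * cp^(k-j).
def Sc (ap : List Int) (cp : Int) (k : Nat) : Int :=
  ((List.range (k + 1)).map (fun j => ap.getD j 0 * cp ^ (k - j))).sum

-- peeling the head off the closed-form sum
theorem Sc_cons (a cp : Int) (t : List Int) (k : Nat) :
    Sc (a :: t) cp (k + 1) = a * cp ^ (k + 1) + Sc t cp k := by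
  unfold Sc
  rw [show k + 1 + 1 = (k + 1) + 1 from rfl, List.range_succ_eq_map, List.map_cons, List.map_map]
  simp only [List.sum_cons]
  refine congrArg₂ _ (by simp) (congrArg _ (List.map_congr_left fun j hj => ?_))
  simp [Nat.succ_sub_succ]

-- shifting the seed by one Horner step shifts the closed form by one index
theorem Sc_step (a0 x cp : Int) (xs : List Int) (k : Nat) :
    Sc (a0 :: x :: xs) cp (k + 1) = Sc ((x + cp * a0) :: xs) cp k := by
  cases k with
  | zero => simp [Sc, List.range_succ]; ring
  | succ m => rw [Sc_cons, Sc_cons, Sc_cons]; ring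

-- goH is the closed-form list.
theorem goH_closed (cp : Int) (l : List Int) : ∀ a0 : Int,
    goH cp a0 l = (List.range (l.length + 1)).map (Sc (a0 :: l) cp) := by
  induction l with
  | nil => intro a0; simp [goH, Sc, List.range_succ]
  | cons x xs ih =>
    intro a0
    rw [goH, ih (x + cp * a0)]
    have : (List.range (xs.length + 1 + 1)).map (Sc (a0 :: x :: xs) cp)
        = Sc (a0 :: x :: xs) cp 0 :: (List.range (xs.length + 1)).map (fun k => Sc (a0 :: x :: xs) cp (k + 1)) := by
      rw [List.range_succ_eq_map, List.map_cons, List.map_map]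
      rfl
    simp only [List.length_cons]
    rw [this]
    congr 1
    · simp [Sc]
    · apply List.map_congr_left
      intro k _
      rw [Sc_step]

theorem fB_eq (ap : List Int) (cp : Int) (h : ap ≠ []) :
    fGorner_forRoot_coefsOrderPowerDecrease_alt ap cp
      = (goH cp (ap.getD 0 0) ap.tail).dropLast := by
  obtain ⟨a0, l, rfl⟩ : ∃ a0 l, ap = a0 :: l := by
    cases ap with
    | nil => exact absurd rfl h
    | cons a0 l => exact ⟨a0, l, rfl⟩
  have halt : fGorner_forRoot_coefsOrderPowerDecrease_alt (a0 :: l) cp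
      = (List.range l.length).map (Sc (a0 :: l) cp) := by
    unfold fGorner_forRoot_coefsOrderPowerDecrease_alt
    simp only [List.length_cons, Nat.add_sub_cancel]
    apply List.map_congr_left
    intro k hk
    rw [List.mem_range] at hk
    unfold Sc
    congr 1
    apply List.map_congr_left
    intro j hj
    rw [List.mem_range] at hj
    have hlt : k - j < l.length := by omega
    have hpw : ((List.range l.length).map (fun i => cp ^ i)).getD (k - j) 0 = cp ^ (k - j) := by
      rw [List.getD_eq_getElem _ _ (by simpa using hlt)]
      simp
    rw [hpw]
  rw [halt, show (goH cp ((a0 :: l).getD 0 0) (a0 :: l).tail) = goH cp a0 l from rfl,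
      goH_closed, List.range_succ, List.map_append, List.map_cons, List.map_nil,
      List.dropLast_concat]

-- ===== VERDICT (by name: the statement is the Claim_ definition above) =====
theorem fGorner_forRoot_coefsOrderPowerDecrease_spec : Claim_equal_fGorner_forRoot_coefsOrderPowerDecrease := by
  intro ap cp _ hpre
  unfold Spec_fGorner_forRoot_coefsOrderPowerDecrease
  rw [fA_eq ap cp hpre, fB_eq ap cp hpre]
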